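-- pv_equiv track=rewrite | github.com/mgershovitz/maya_solves | longest_k_unique.py | find_longest_k_unique
-- ===== SOURCE A (Python) =====
-- import copy
-- from collections import defaultdict
--
-- def find_longest_k_unique(arr, k):
--     longest_k_uniuqe = []
--     if len(arr) == 1:
--         return arr
--     else:
--         i = j = 0
--         current_k_unique = [arr[i]]
--         current_range = defaultdict(int)
--         current_range[arr[i]] += 1
--         unique_count = len(current_range.keys())
--
--         while j < len(arr)-1:
--             if unique_count <= k:
--                 j += 1
--                 current_k_unique.append(arr[j])
--                 current_range[arr[j]] += 1
--             else:
--                 del current_k_unique[0]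
--
--                 current_range[arr[i]] -= 1
--                 if current_range[arr[i]] == 0:
--                     current_range.pop(arr[i])
--                 i += 1
--             unique_count = len(current_range.keys())
--             if unique_count == k:
--                 if len(current_k_unique) > len(longest_k_uniuqe):
--                     longest_k_uniuqe = copy.deepcopy(current_k_unique)
--
--         return longest_k_uniuqe
-- ===== SOURCE B (Python) =====
-- def find_longest_k_unique(arr, k):
--     if len(arr) == 1:
--         return arr
--     best = []
--     for j in range(len(arr)):
--         seen = set()
--         i = j
--         while i >= 0:
--             seen.add(arr[i])
--             if len(seen) == k and j - i + 1 > len(best):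
--                 best = arr[i:j+1]
--             i -= 1
--     return best
-- ===== Notes on version B (the rewrite author's own statement) =====
-- stated objective: alternative
-- what changed: Replaced the single-pass two-pointer sliding window with a counts-dict by a brute-force nested scan: for each right end the window grows leftwards with a plain set of seen elements, recording every strictly longer window with exactly k distinct values; this also fixes A's missed length-1 window at index 0 when k=1.
-- intended difference: When k=1, the array has at least 2 elements and no two adjacent elements are equal, A never examines the initial one-element window, so it returns [] (length 2) or [arr[1]], while B returns [arr[0]], the leftmost longest window with exactly 1 distinct element, which is the intended value. — e.g. on find_longest_k_unique([3, 1], 1): A returns [], B returns [3]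
import Mathlib
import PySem

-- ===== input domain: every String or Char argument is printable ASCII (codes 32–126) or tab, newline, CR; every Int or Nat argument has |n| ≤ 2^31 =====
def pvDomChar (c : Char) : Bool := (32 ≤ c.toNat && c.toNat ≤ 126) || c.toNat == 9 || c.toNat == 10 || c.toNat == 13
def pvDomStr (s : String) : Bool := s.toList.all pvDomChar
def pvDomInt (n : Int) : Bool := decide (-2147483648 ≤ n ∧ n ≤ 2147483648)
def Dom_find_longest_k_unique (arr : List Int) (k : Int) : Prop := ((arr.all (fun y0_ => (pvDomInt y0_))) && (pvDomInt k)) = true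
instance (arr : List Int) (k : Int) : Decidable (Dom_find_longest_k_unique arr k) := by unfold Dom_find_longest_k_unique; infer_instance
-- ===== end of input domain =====

-- B replaces A's one-pass two-pointer sliding window (counts dict) by a brute-force nested scan
-- (for each right end, grow the window leftwards with a set of seen elements); same cost class is
-- not claimed — the objective is an alternative algorithm; B also returns the intended leftmost
-- longest window where A misses the one-element window at index 0 (see D_ below).

-- ===== PORT A =====
-- the while loop of A: state i, j (Python's two pointers), cur = current_k_unique,
-- cnt = current_range, best = longest_k_uniuqe; fuel only makes the recursion total
-- (2*len(arr)+2 steps always suffice on inputs admitted by Pre_, proved below).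
def loopA (arr : List Int) (k : Int) : Nat → Nat → Nat → List Int → PySem.Dict Int Int → List Int → List Int
  | 0, _, _, _, _, best => best
  | fuel+1, i, j, cur, cnt, best =>
    if j < arr.length - 1 then
      if (cnt.size : Int) ≤ k then
        -- j += 1; current_k_unique.append(arr[j]); current_range[arr[j]] += 1
        let x := PySem.List.pyGetD arr ((j : Int) + 1) 0
        let cur' := cur ++ [x]
        let cnt' := cnt.modify x 0 (· + 1)
        let best' := if (cnt'.size : Int) = k ∧ best.length < cur'.length then cur' else best
        loopA arr k fuel i (j+1) cur' cnt' best'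
      else
        match cur with
        | [] => best   -- Python raises IndexError here (del on an empty list); excluded by Pre_
        | _ :: rest =>
          -- del current_k_unique[0]; current_range[arr[i]] -= 1; pop if 0; i += 1
          let y := PySem.List.pyGetD arr (i : Int) 0
          let cnt1 := cnt.modify y 0 (· - 1)
          let cnt' := if cnt1.getD y 0 = 0 then cnt1.erase y else cnt1
          let best' := if (cnt'.size : Int) = k ∧ best.length < rest.length then rest else best
          loopA arr k fuel (i+1) j rest cnt' best'
    else best

def find_longest_k_unique (arr : List Int) (k : Int) : List Int :=
  if PySem.List.len arr = 1 then arr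
  else
    match arr with
    | [] => []   -- Python raises IndexError here (arr[0] on an empty list); excluded by Pre_
    | x :: _ =>
      -- i = j = 0; current_k_unique = [arr[0]]; current_range[arr[0]] += 1
      loopA arr k (2*arr.length + 2) 0 0 [x] ((PySem.Dict.empty).modify x 0 (· + 1)) []

-- ===== PORT B =====
-- body of B's inner while loop at index i (right end j): seen.add(arr[i]); record arr[i:j+1]
-- if it has exactly k distinct elements and is strictly longer than best.
def bstep (arr : List Int) (k : Int) (j i : Nat) (seen : PySem.Set Int) (best : List Int) :
    PySem.Set Int × List Int :=
  let seen' := PySem.Set.add seen (PySem.List.pyGetD arr (i : Int) 0)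
  let best' := if (seen'.length : Int) = k ∧ (best.length : Int) < (j : Int) - (i : Int) + 1
               then PySem.List.slice arr (some (i : Int)) (some ((j : Int) + 1)) else best
  (seen', best')

-- B's inner 'while i >= 0' loop, i counting down from j
def innerB (arr : List Int) (k : Int) (j : Nat) : Nat → PySem.Set Int → List Int → List Int
  | 0, seen, best => (bstep arr k j 0 seen best).2
  | i+1, seen, best =>
    let p := bstep arr k j (i+1) seen best
    innerB arr k j i p.1 p.2

def find_longest_k_unique_alt (arr : List Int) (k : Int) : List Int :=
  if PySem.List.len arr = 1 then arr
  else (List.range arr.length).foldl (fun best j => innerB arr k j j PySem.Set.empty best) []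

-- ===== PRECONDITION & SPEC =====
-- Pre_ excludes exactly the inputs on which A raises IndexError: the empty list (A reads arr[0])
-- and k < 0 with at least two elements (A's shrink branch eventually deletes from an empty window).
def Pre_find_longest_k_unique (arr : List Int) (k : Int) : Prop :=
  arr ≠ [] ∧ (0 ≤ k ∨ arr.length = 1)
instance (arr : List Int) (k : Int) : Decidable (Pre_find_longest_k_unique arr k) := by
  unfold Pre_find_longest_k_unique; infer_instance
def pvWitness_find_longest_k_unique : List Int × Int := ([1, 2, 2, 3], 2)

-- When k = 1, the array has at least 2 elements and no two adjacent elements are equal, A never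
-- examines the initial one-element window, so it returns [] (length 2) or [arr[1]], while B
-- returns [arr[0]], the leftmost longest window with exactly 1 distinct element — the intended value.
def D_find_longest_k_unique (arr : List Int) (k : Int) : Prop :=
  k = 1 ∧ 2 ≤ arr.length ∧ List.IsChain (· ≠ ·) arr
instance (arr : List Int) (k : Int) : Decidable (D_find_longest_k_unique arr k) := by
  unfold D_find_longest_k_unique; infer_instance

def Spec_find_longest_k_unique (arr : List Int) (k : Int) (out : List Int) : Prop :=
  ¬ D_find_longest_k_unique arr k → out = find_longest_k_unique_alt arr k
instance (arr : List Int) (k : Int) (out : List Int) : Decidable (Spec_find_longest_k_unique arr k out) := by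
  unfold Spec_find_longest_k_unique; infer_instance

def pvDiffWitness_find_longest_k_unique : List Int × Int := ([3, 1], 1)
def pvDiffWitnessOut_find_longest_k_unique : (List Int) × (List Int) := ([], [3])

-- ===== CLAIM (what is proved, stated in full; the proofs are below) =====
def Claim_unchanged_find_longest_k_unique : Prop := ∀ (arr : List Int) (k : Int), Dom_find_longest_k_unique arr k → Pre_find_longest_k_unique arr k → Spec_find_longest_k_unique arr k (find_longest_k_unique arr k)
def Claim_changed_find_longest_k_unique : Prop := Dom_find_longest_k_unique (pvDiffWitness_find_longest_k_unique.1) (pvDiffWitness_find_longest_k_unique.2) ∧ Pre_find_longest_k_unique (pvDiffWitness_find_longest_k_unique.1) (pvDiffWitness_find_longest_k_unique.2) ∧ D_find_longest_k_unique (pvDiffWitness_find_longest_k_unique.1) (pvDiffWitness_find_longest_k_unique.2) ∧ find_longest_k_unique (pvDiffWitness_find_longest_k_unique.1) (pvDiffWitness_find_longest_k_unique.2) = pvDiffWitnessOut_find_longest_k_unique.1 ∧ find_longest_k_unique_alt (pvDiffWitness_find_longest_k_unique.1) (pvDiffWitness_find_longest_k_unique.2) = pvDiffWitnessOut_find_longest_k_unique.2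 ∧ pvDiffWitnessOut_find_longest_k_unique.1 ≠ pvDiffWitnessOut_find_longest_k_unique.2
def Claim_exact_find_longest_k_unique : Prop := ∀ (arr : List Int) (k : Int), Dom_find_longest_k_unique arr k → Pre_find_longest_k_unique arr k → D_find_longest_k_unique arr k → find_longest_k_unique arr k ≠ find_longest_k_unique_alt arr k
-- ===== LEMMAS AND PROOFS =====

-- ---- abstract vocabulary: windows, distinct counts, minimal window start ----

-- the window arr[i:e]
def win (arr : List Int) (i e : Nat) : List Int := (arr.drop i).take (e - i)

-- number of distinct elements of arr[i:e]
def dcnt (arr : List Int) (i e : Nat) : Nat := (win arr i e).toFinset.card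

-- least window start i with at most k distinct elements in arr[i:e]
def mgo (arr : List Int) (k : Int) (e : Nat) (i : Nat) : Nat :=
  if e ≤ i then e
  else if (dcnt arr i e : Int) ≤ k then i else mgo arr k e (i+1)
termination_by e - i

def mstart (arr : List Int) (k : Int) (e : Nat) : Nat := mgo arr k e 0

-- record the canonical (longest, = leftmost-start) window with end e if it has exactly k
-- distinct elements and is strictly longer than the best so far
def upd (arr : List Int) (k : Int) (e : Nat) (b : List Int) : List Int :=
  if (dcnt arr (mstart arr k e) e : Int) = k ∧ b.length < e - mstart arr k e
  then win arr (mstart arr k e) e else b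

def foldUpd (arr : List Int) (k : Int) (es : List Nat) (b : List Int) : List Int :=
  es.foldl (fun b e => upd arr k e b) b

-- the windows A still checks from a stable state (i = mstart) with window end e on
def Aabs (arr : List Int) (k : Int) (e : Nat) (b : List Int) : List Int :=
  if h : arr.length ≤ e then b
  else if e + 1 = arr.length then
    (if mstart arr k (e+1) = mstart arr k e then upd arr k (e+1) b else b)
  else Aabs arr k (e+1) (upd arr k (e+1) b)
termination_by arr.length - e

-- A's final-end quirk: the canonical window ending at len(arr) is only checked when no shrink
-- would have been needed for it
def endn (arr : List Int) (k : Int) (b : List Int) : List Int :=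
  if mstart arr k arr.length = mstart arr k (arr.length - 1) then upd arr k arr.length b else b

-- value of A's loop from an arbitrary admissible state
def targetA (arr : List Int) (k : Int) (i e : Nat) (b : List Int) : List Int :=
  if e = arr.length then b
  else if (dcnt arr i e : Int) ≤ k then Aabs arr k e b
  else Aabs arr k e (upd arr k e b)

-- the counts dict faithfully describes the current window
def CntOk (cur : List Int) (cnt : PySem.Dict Int Int) : Prop :=
  cnt.keys.Nodup ∧ (∀ x : Int, cnt.getD x 0 = (cur.count x : Int)) ∧
  (∀ x : Int, x ∈ cnt.keys ↔ x ∈ cur)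

-- B's inner-loop step at start index i, abstractly
def bupd (arr : List Int) (k : Int) (j i : Nat) (b : List Int) : List Int :=
  if (dcnt arr i (j+1) : Int) = k ∧ b.length < j + 1 - i then win arr i (j+1) else b

-- B's inner loop, abstractly: process start indices i, i-1, …, 0
def Bco (arr : List Int) (k : Int) (j : Nat) : Nat → List Int → List Int
  | 0, b => bupd arr k j 0 b
  | i+1, b => Bco arr k j i (bupd arr k j (i+1) b)

-- ---- window and distinct-count basics ----

lemma win_cons (arr : List Int) (i e : Nat) (hi : i < e) (he : i < arr.length) :
    win arr i e = arr[i] :: win arr (i+1) e := by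
  unfold win
  rw [List.drop_eq_getElem_cons he, show e - i = (e - (i+1)) + 1 by omega, List.take_succ_cons]

lemma win_snoc (arr : List Int) (i e : Nat) (hi : i ≤ e) (he : e < arr.length) :
    win arr i (e+1) = win arr i e ++ [arr[e]] := by
  unfold win
  rw [show e + 1 - i = (e - i) + 1 by omega, List.take_add_one]
  have h2 : (arr.drop i)[e-i]? = some arr[e] := by
    rw [List.getElem?_drop, show i + (e - i) = e by omega]
    exact List.getElem?_eq_getElem he
  simp [h2]

lemma win_len (arr : List Int) (i e : Nat) (he : e ≤ arr.length) :
    (win arr i e).length = e - i := by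
  simp [win]; omega

lemma win_empty (arr : List Int) (i e : Nat) (h : e ≤ i) : win arr i e = [] := by
  simp [win, show e - i = 0 by omega]

lemma win_drop_empty (arr : List Int) (i e : Nat) (h : arr.length ≤ i) : win arr i e = [] := by
  simp [win, List.drop_eq_nil_of_le h]

lemma dcnt_le_succ_left (arr : List Int) (i e : Nat) :
    dcnt arr (i+1) e ≤ dcnt arr i e := by
  by_cases hie : i < e
  · by_cases hin : i < arr.length
    · unfold dcnt
      rw [win_cons arr i e hie hin]
      simp only [List.toFinset_cons]
      exact Finset.card_le_card (Finset.subset_insert _ _)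
    · unfold dcnt
      rw [win_drop_empty arr i e (by omega), win_drop_empty arr (i+1) e (by omega)]
  · unfold dcnt
    rw [win_empty arr i e (by omega), win_empty arr (i+1) e (by omega)]

lemma dcnt_anti (arr : List Int) (e : Nat) : ∀ i j : Nat, i ≤ j → dcnt arr j e ≤ dcnt arr i e := by
  intro i j hij
  induction j with
  | zero => have : i = 0 := by omega
            subst this; exact le_refl _
  | succ j ih =>
    rcases Nat.lt_or_ge i (j+1) with h | h
    · exact le_trans (dcnt_le_succ_left arr j e) (ih (by omega))
    · have : i = j + 1 := by omega
      subst this; exact le_refl _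

lemma dcnt_succ_left_ge (arr : List Int) (i e : Nat) :
    dcnt arr i e ≤ dcnt arr (i+1) e + 1 := by
  by_cases hie : i < e
  · by_cases hin : i < arr.length
    · unfold dcnt
      rw [win_cons arr i e hie hin]
      simp only [List.toFinset_cons]
      exact Finset.card_insert_le _ _
    · unfold dcnt
      rw [win_drop_empty arr i e (by omega)]
      simp
  · unfold dcnt
    rw [win_empty arr i e (by omega)]
    simp

lemma dcnt_le_succ_right (arr : List Int) (i e : Nat) (hi : i ≤ e) (he : e < arr.length) :
    dcnt arr i e ≤ dcnt arr i (e+1) ∧ dcnt arr i (e+1) ≤ dcnt arr i e + 1 := by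
  unfold dcnt
  rw [win_snoc arr i e hi he]
  rw [List.toFinset_append]
  constructor
  · exact Finset.card_le_card (Finset.subset_union_left)
  · calc ((win arr i e).toFinset ∪ [arr[e]].toFinset).card
        ≤ (win arr i e).toFinset.card + [arr[e]].toFinset.card := Finset.card_union_le _ _
      _ ≤ (win arr i e).toFinset.card + 1 := by simp

lemma dcnt_zero (arr : List Int) (i e : Nat) (h : e ≤ i) : dcnt arr i e = 0 := by
  unfold dcnt
  rw [win_empty arr i e h]
  simp

lemma dcnt_pos (arr : List Int) (i e : Nat) (hi : i < e) (he : e ≤ arr.length) :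
    1 ≤ dcnt arr i e := by
  unfold dcnt
  have hne : win arr i e ≠ [] := by
    have := win_len arr i e he
    intro h; rw [h] at this; simp at this; omega
  have : (win arr i e).toFinset.Nonempty := by
    rcases List.exists_mem_of_ne_nil _ hne with ⟨x, hx⟩
    exact ⟨x, List.mem_toFinset.2 hx⟩
  exact Finset.card_pos.2 this

-- ---- mstart basics ----

lemma mgo_spec (arr : List Int) (k : Int) (e : Nat) : ∀ i : Nat, i ≤ e →
    i ≤ mgo arr k e i ∧ mgo arr k e i ≤ e ∧
    (∀ t, i ≤ t → t < mgo arr k e i → k < (dcnt arr t e : Int)) ∧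
    (mgo arr k e i < e → (dcnt arr (mgo arr k e i) e : Int) ≤ k) := by
  intro i hie
  induction hd : e - i using Nat.strong_induction_on generalizing i with
  | _ d ih => ?_
  rw [mgo]
  by_cases h1 : e ≤ i
  · simp only [h1, if_true]
    exact ⟨by omega, le_refl _, fun t ht1 ht2 => by omega, fun h => by omega⟩
  · simp only [h1, if_false]
    by_cases h2 : (dcnt arr i e : Int) ≤ k
    · simp only [h2, if_true]
      exact ⟨le_refl _, by omega, fun t ht1 ht2 => by omega, fun _ => trivial⟩
    · simp only [h2, if_false]
      have hrec := ih (e - (i+1)) (by omega) (i+1) (by omega) rfl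
      refine ⟨by omega, hrec.2.1, ?_, hrec.2.2.2⟩
      intro t ht1 ht2
      rcases Nat.lt_or_ge t (i+1) with h | h
      · have : t = i := by omega
        subst this; omega
      · exact hrec.2.2.1 t h ht2

lemma mstart_le (arr : List Int) (k : Int) (e : Nat) : mstart arr k e ≤ e := by
  exact (mgo_spec arr k e 0 (by omega)).2.1

lemma dcnt_mstart_le (arr : List Int) (k : Int) (e : Nat) (hk : 0 ≤ k) :
    (dcnt arr (mstart arr k e) e : Int) ≤ k := by
  unfold mstart
  have h := mgo_spec arr k e 0 (by omega)
  rcases Nat.lt_or_ge (mgo arr k e 0) e with hlt | hge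
  · exact h.2.2.2 hlt
  · have he : mgo arr k e 0 = e := by omega
    rw [he, dcnt_zero arr e e (le_refl _)]
    simpa using hk

lemma mstart_min (arr : List Int) (k : Int) (e i : Nat) (h : (dcnt arr i e : Int) ≤ k) :
    mstart arr k e ≤ i := by
  unfold mstart
  by_contra hc
  exact absurd h (by simpa using (mgo_spec arr k e 0 (by omega)).2.2.1 i (by omega) (by omega))

lemma lt_mstart (arr : List Int) (k : Int) (e i : Nat) (h : i < mstart arr k e) :
    k < (dcnt arr i e : Int) := by
  unfold mstart at h
  exact (mgo_spec arr k e 0 (by omega)).2.2.1 i (by omega) h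

lemma mstart_mono (arr : List Int) (k : Int) (e : Nat) (hk : 0 ≤ k) (he : e < arr.length) :
    mstart arr k e ≤ mstart arr k (e+1) := by
  set m' := mstart arr k (e+1) with hm'
  rcases Nat.lt_or_ge m' (e+1) with h | h
  · rcases Nat.lt_or_ge m' e with h2 | h2
    · apply mstart_min
      have hstep := (dcnt_le_succ_right arr m' e (by omega) he).1
      have := dcnt_mstart_le arr k (e+1) hk
      rw [← hm'] at this
      omega
    · calc mstart arr k e ≤ e := mstart_le arr k e
        _ ≤ m' := h2
  · calc mstart arr k e ≤ e := mstart_le arr k e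
      _ ≤ m' := by omega

-- if any window ending at e has exactly k distinct elements, so has the canonical one
lemma dcnt_mstart_eq_of_exists (arr : List Int) (k : Int) (e i : Nat)
    (h : (dcnt arr i e : Int) = k) : (dcnt arr (mstart arr k e) e : Int) = k := by
  have h1 : mstart arr k e ≤ i := mstart_min arr k e i (le_of_eq h)
  have h2 := dcnt_anti arr e (mstart arr k e) i h1
  have h3 := dcnt_mstart_le arr k e (by omega)
  omega

-- ===== the A side: the loop computes targetA =====

lemma pv_find?_filter_none (l : List (Int × Int)) (x : Int) :
    (l.filter (fun p => !(p.1 == x))).find? (fun p => p.1 == x) = none := by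
  rw [List.find?_eq_none]
  intro p hp
  simp only [List.mem_filter] at hp
  simpa using hp.2

lemma pv_find?_filter_ne (l : List (Int × Int)) (x y : Int) (h : y ≠ x) :
    (l.filter (fun p => !(p.1 == x))).find? (fun p => p.1 == y) = l.find? (fun p => p.1 == y) := by
  induction l with
  | nil => rfl
  | cons p t ih =>
    by_cases hp : p.1 = x
    · have h2 : (p.1 == y) = false := by simp [hp]; exact fun hh => h hh.symm
      have h3 : (p :: t).filter (fun p => !(p.1 == x)) = t.filter (fun p => !(p.1 == x)) := by
        simp [hp]
      rw [h3, ih, List.find?_cons, h2]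
    · have h3 : (p :: t).filter (fun p => !(p.1 == x)) = p :: t.filter (fun p => !(p.1 == x)) := by
        simp [hp]
      rw [h3, List.find?_cons, List.find?_cons]
      cases h2 : (p.1 == y) with
      | true => rfl
      | false => exact ih

lemma pv_erase_getD_self (d : PySem.Dict Int Int) (x : Int) : (d.erase x).getD x 0 = 0 := by
  show (Option.map (fun p => p.2) (List.find? (fun p => p.1 == x) (List.filter (fun p => !(p.1 == x)) d.items))).getD 0 = 0
  rw [pv_find?_filter_none]
  rfl

lemma pv_erase_getD_ne (d : PySem.Dict Int Int) (x y : Int) (h : y ≠ x) :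
    (d.erase x).getD y 0 = d.getD y 0 := by
  show (Option.map (fun p => p.2) (List.find? (fun p => p.1 == y) (List.filter (fun p => !(p.1 == x)) d.items))).getD 0 = _
  rw [pv_find?_filter_ne _ _ _ h]
  rfl

lemma pv_erase_keys (d : PySem.Dict Int Int) (x : Int) :
    (d.erase x).keys = d.keys.filter (fun a => !(a == x)) := by
  simp only [PySem.Dict.erase, PySem.Dict.keys]
  induction d.items with
  | nil => rfl
  | cons p t ih =>
    by_cases hp : p.1 = x
    · simp [hp, ih]
    · simp [hp, ih]

lemma cntOk_size (cur : List Int) (cnt : PySem.Dict Int Int) (h : CntOk cur cnt) :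
    cnt.size = cur.toFinset.card := by
  obtain ⟨hnd, _, hmem⟩ := h
  have h1 : cnt.size = cnt.keys.length := by simp [PySem.Dict.size, PySem.Dict.keys]
  have h2 : cnt.keys.toFinset = cur.toFinset := by
    ext x
    simp only [List.mem_toFinset]
    exact hmem x
  rw [h1, ← List.toFinset_card_of_nodup hnd, h2]

lemma cntOk_extend (cur : List Int) (cnt : PySem.Dict Int Int) (h : CntOk cur cnt) (x : Int) :
    CntOk (cur ++ [x]) (cnt.modify x 0 (· + 1)) := by
  obtain ⟨hnd, hgd, hmem⟩ := h
  refine ⟨?_, ?_, ?_⟩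
  · rw [PySem.Dict.keys_modify]
    by_cases hc : cnt.contains x = true
    · rw [PySem.Dict.keys_insert_of_contains _ _ hc]; exact hnd
    · rw [PySem.Dict.keys_insert_of_not_contains _ _ (by simpa using hc)]
      refine List.nodup_append.2 ⟨hnd, List.nodup_singleton _, ?_⟩
      intro a ha b hb
      rw [List.mem_singleton] at hb
      subst hb
      intro heq
      subst heq
      exact hc ((PySem.Dict.contains_iff_mem_keys _ _).2 ha)
  · intro z
    rw [PySem.Dict.getD_modify]
    by_cases hz : z = x
    · subst hz
      simp [hgd z, List.count_append]
    · simp [hz, hgd z, List.count_append, Ne.symm hz]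
  · intro z
    rw [PySem.Dict.keys_modify]
    by_cases hc : cnt.contains x = true
    · rw [PySem.Dict.keys_insert_of_contains _ _ hc]
      have hxcur : x ∈ cur := (hmem x).1 ((PySem.Dict.contains_iff_mem_keys _ _).1 hc)
      constructor
      · intro hz; exact List.mem_append_left _ ((hmem z).1 hz)
      · intro hz
        rcases List.mem_append.1 hz with hz | hz
        · exact (hmem z).2 hz
        · simp only [List.mem_singleton] at hz; subst hz; exact (hmem z).2 hxcur
    · rw [PySem.Dict.keys_insert_of_not_contains _ _ (by simpa using hc)]
      simp only [List.mem_append, List.mem_singleton]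
      rw [hmem z]

lemma cntOk_shrink (y : Int) (rest : List Int) (cnt : PySem.Dict Int Int)
    (h : CntOk (y :: rest) cnt) :
    CntOk rest (if (cnt.modify y 0 (· - 1)).getD y 0 = 0
                then (cnt.modify y 0 (· - 1)).erase y else cnt.modify y 0 (· - 1)) := by
  obtain ⟨hnd, hgd, hmem⟩ := h
  have hycur : y ∈ cnt.keys := (hmem y).2 (List.mem_cons_self)
  have hyc : cnt.contains y = true := (PySem.Dict.contains_iff_mem_keys _ _).2 hycur
  have hk1 : (cnt.modify y 0 (· - 1)).keys = cnt.keys := by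
    rw [PySem.Dict.keys_modify, PySem.Dict.keys_insert_of_contains _ _ hyc]
  have hg1 : ∀ z : Int, (cnt.modify y 0 (· - 1)).getD z 0 = (rest.count z : Int) + (if z = y then 0 else if z = y then 1 else 0) := by
    intro z
    rw [PySem.Dict.getD_modify]
    by_cases hz : z = y
    · subst hz
      rw [hgd z]
      simp [List.count_cons_self]
    · simp [hz, hgd z, Ne.symm hz]
  have hg1' : ∀ z : Int, (cnt.modify y 0 (· - 1)).getD z 0 = (rest.count z : Int) := by
    intro z; rw [hg1 z]; by_cases hz : z = y <;> simp [hz]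
  by_cases h0 : (cnt.modify y 0 (· - 1)).getD y 0 = 0
  · rw [if_pos h0]
    have hy0 : rest.count y = 0 := by have := hg1' y; rw [h0] at this; exact_mod_cast this.symm
    refine ⟨?_, ?_, ?_⟩
    · rw [pv_erase_keys, hk1]
      exact List.Nodup.filter _ hnd
    · intro z
      by_cases hz : z = y
      · subst hz
        rw [pv_erase_getD_self, hy0]
        simp
      · rw [pv_erase_getD_ne _ _ _ hz, hg1' z]
    · intro z
      rw [pv_erase_keys, hk1, List.mem_filter]
      by_cases hz : z = y
      · subst hz
        constructor
        · intro hz2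
          exact absurd hz2.2 (by simp)
        · intro hz2
          exact absurd hz2 (List.count_eq_zero.1 hy0)
      · have hby : (z == y) = false := by simpa using hz
        rw [hby]
        simp only [Bool.not_false, and_true]
        rw [hmem z]
        constructor
        · intro hz2
          rcases List.mem_cons.1 hz2 with h5 | h5
          · exact absurd h5 hz
          · exact h5
        · intro hz2
          exact List.mem_cons_of_mem _ hz2
  · rw [if_neg h0]
    have hy1 : y ∈ rest := by
      have h2 := hg1' y
      have h3 : (rest.count y : Int) ≠ 0 := by rw [← h2]; exact h0
      have h4 : 0 < rest.count y := by
        rcases Nat.eq_zero_or_pos (rest.count y) with h5 | h5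
        · rw [h5] at h3; simp at h3
        · exact h5
      exact List.count_pos_iff.1 h4
    refine ⟨by rw [hk1]; exact hnd, hg1', ?_⟩
    intro z
    rw [hk1, hmem z]
    constructor
    · intro hz
      rcases List.mem_cons.1 hz with hz | hz
      · subst hz; exact hy1
      · exact hz
    · intro hz; exact List.mem_cons_of_mem _ hz

lemma loopA_eq (arr : List Int) (k : Int) (hk : 0 ≤ k) :
    ∀ (fuel i j : Nat) (cur : List Int) (cnt : PySem.Dict Int Int) (b : List Int),
    j + 1 ≤ arr.length → i ≤ mstart arr k (j+1) →
    (dcnt arr i (j+1) : Int) ≤ k + 1 →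
    ((dcnt arr i (j+1) : Int) ≤ k → i = mstart arr k (j+1)) →
    cur = win arr i (j+1) → CntOk cur cnt →
    (arr.length - (j+1)) + (arr.length - i) < fuel →
    loopA arr k fuel i j cur cnt b = targetA arr k i (j+1) b := by
  intro fuel
  induction fuel with
  | zero => intro i j cur cnt b _ _ _ _ _ _ hfuel; omega
  | succ fuel ih =>
    intro i j cur cnt b he him hd1 hd2 hcur hok hfuel
    have hn1 : 1 ≤ arr.length := by omega
    have husize : (cnt.size : Int) = (dcnt arr i (j+1) : Int) := by
      rw [cntOk_size cur cnt hok, hcur]; rfl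
    by_cases hg : j < arr.length - 1
    · -- e := j+1 < n
      have hen : j + 1 < arr.length := by omega
      simp only [loopA]
      rw [if_pos hg]
      by_cases hle : (cnt.size : Int) ≤ k
      · -- extend step
        rw [if_pos hle]
        rw [husize] at hle
        have hieq : i = mstart arr k (j+1) := hd2 hle
        have hile : i ≤ j + 1 := by
          calc i ≤ mstart arr k (j+1) := him
            _ ≤ j + 1 := mstart_le arr k (j+1)
        have hx : PySem.List.pyGetD arr ((j : Int) + 1) 0 = arr[j+1] := by
          rw [show ((j : Int) + 1) = ((j+1 : Nat) : Int) by push_cast; ring]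
          rw [PySem.List.pyGetD_natCast]
          exact List.getD_eq_getElem arr 0 hen
        have hcur' : cur ++ [PySem.List.pyGetD arr ((j : Int) + 1) 0] = win arr i (j+1+1) := by
          rw [hx, hcur, win_snoc arr i (j+1) hile hen]
        have hok' : CntOk (cur ++ [PySem.List.pyGetD arr ((j : Int) + 1) 0])
            (cnt.modify (PySem.List.pyGetD arr ((j : Int) + 1) 0) 0 (· + 1)) :=
          cntOk_extend cur cnt hok _
        have husize' : ((cnt.modify (PySem.List.pyGetD arr ((j : Int) + 1) 0) 0 (· + 1)).size : Int)
            = (dcnt arr i (j+1+1) : Int) := by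
          rw [cntOk_size _ _ hok', hcur']; rfl
        have hlen' : (cur ++ [PySem.List.pyGetD arr ((j : Int) + 1) 0]).length = j+1+1 - i := by
          rw [hcur', win_len arr i (j+1+1) (by omega)]
        -- facts about the new distinct count
        have hmono : mstart arr k (j+1) ≤ mstart arr k (j+1+1) := mstart_mono arr k (j+1) hk hen
        have hdd := dcnt_le_succ_right arr i (j+1) hile hen
        have hd1' : (dcnt arr i (j+1+1) : Int) ≤ k + 1 := by
          have := hdd.2; omega
        have him' : i ≤ mstart arr k (j+1+1) := by omega
        have hd2' : (dcnt arr i (j+1+1) : Int) ≤ k → i = mstart arr k (j+1+1) := by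
          intro h
          have := mstart_min arr k (j+1+1) i h
          omega
        have hrec := ih i (j+1) _ _
          (if ((cnt.modify (PySem.List.pyGetD arr ((j : Int) + 1) 0) 0 (· + 1)).size : Int) = k ∧
              b.length < (cur ++ [PySem.List.pyGetD arr ((j : Int) + 1) 0]).length
           then cur ++ [PySem.List.pyGetD arr ((j : Int) + 1) 0] else b)
          (by omega) him' hd1' hd2' hcur' hok' (by omega)
        rw [hrec]
        -- now compare targetA i (j+1) b with targetA i (j+1+1) b'
        have htb : targetA arr k i (j+1) b = Aabs arr k (j+1) b := by
          rw [targetA, if_neg (by omega), if_pos hle]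
        rw [htb]
        by_cases hu' : (dcnt arr i (j+1+1) : Int) ≤ k
        · -- b' = upd (e+1) b, stable at e+1
          have hieq' : i = mstart arr k (j+1+1) := hd2' hu'
          have hb' : (if ((cnt.modify (PySem.List.pyGetD arr ((j : Int) + 1) 0) 0 (· + 1)).size : Int) = k ∧
              b.length < (cur ++ [PySem.List.pyGetD arr ((j : Int) + 1) 0]).length
           then cur ++ [PySem.List.pyGetD arr ((j : Int) + 1) 0] else b) = upd arr k (j+1+1) b := by
            rw [upd, ← hieq', husize', hlen', hcur']
          rw [hb']
          rw [Aabs, dif_neg (by omega : ¬ arr.length ≤ j + 1), targetA]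
          by_cases hlast : j + 1 + 1 = arr.length
          · rw [if_pos hlast, if_pos hlast,
                if_pos (show mstart arr k (j+1+1) = mstart arr k (j+1) by omega)]
          · rw [if_neg hlast, if_neg hlast, if_pos hu']
        · -- overshoot: dcnt = k+1, b' = b
          have hb' : (if ((cnt.modify (PySem.List.pyGetD arr ((j : Int) + 1) 0) 0 (· + 1)).size : Int) = k ∧
              b.length < (cur ++ [PySem.List.pyGetD arr ((j : Int) + 1) 0]).length
           then cur ++ [PySem.List.pyGetD arr ((j : Int) + 1) 0] else b) = b := by
            rw [if_neg]
            intro hcontra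
            rw [husize'] at hcontra
            exact hu' (le_of_eq hcontra.1)
          rw [hb']
          rw [Aabs, dif_neg (by omega : ¬ arr.length ≤ j + 1), targetA]
          by_cases hlast : j + 1 + 1 = arr.length
          · rw [if_pos hlast, if_pos hlast]
            by_cases hmm : mstart arr k (j+1+1) = mstart arr k (j+1)
            · rw [if_pos hmm]
              symm
              rw [upd, if_neg]
              intro hcontra
              rw [hmm, ← hieq] at hcontra
              exact hu' (le_of_eq hcontra.1)
            · rw [if_neg hmm]
          · rw [if_neg hlast, if_neg hlast, if_neg hu']
      · -- shrink step
        rw [if_neg hle]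
        rw [husize] at hle
        have hd1eq : (dcnt arr i (j+1) : Int) = k + 1 := by omega
        have hilt : i < mstart arr k (j+1) := by
          rcases Nat.lt_or_ge i (mstart arr k (j+1)) with h | h
          · exact h
          · exfalso
            have h1 := dcnt_anti arr (j+1) (mstart arr k (j+1)) i h
            have h2 := dcnt_mstart_le arr k (j+1) hk
            omega
        have hie : i < j + 1 := by
          have := mstart_le arr k (j+1); omega
        have hin : i < arr.length := by omega
        have hcons : cur = arr[i] :: win arr (i+1) (j+1) := by
          rw [hcur]; exact win_cons arr i (j+1) hie hin
        subst hcons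
        have hy : PySem.List.pyGetD arr (i : Int) 0 = arr[i] := by
          rw [PySem.List.pyGetD_natCast]
          exact List.getD_eq_getElem arr 0 hin
        rw [hy]
        have hok' := cntOk_shrink (arr[i]) (win arr (i+1) (j+1)) cnt hok
        have husize' : ((if (cnt.modify arr[i] 0 (· - 1)).getD arr[i] 0 = 0
              then (cnt.modify arr[i] 0 (· - 1)).erase arr[i]
              else cnt.modify arr[i] 0 (· - 1)).size : Int) = (dcnt arr (i+1) (j+1) : Int) := by
          rw [cntOk_size _ _ hok']; rfl
        have hrestlen : (win arr (i+1) (j+1)).length = j + 1 - (i+1) := win_len arr (i+1) (j+1) (by omega)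
        have hddge := dcnt_succ_left_ge arr i (j+1)
        have hddle := dcnt_le_succ_left arr i (j+1)
        have him' : i + 1 ≤ mstart arr k (j+1) := hilt
        have hd1' : (dcnt arr (i+1) (j+1) : Int) ≤ k + 1 := by omega
        have hd2' : (dcnt arr (i+1) (j+1) : Int) ≤ k → i + 1 = mstart arr k (j+1) := by
          intro h
          have := mstart_min arr k (j+1) (i+1) h
          omega
        have hrec := ih (i+1) j (win arr (i+1) (j+1)) _
          (if ((if (cnt.modify arr[i] 0 (· - 1)).getD arr[i] 0 = 0
              then (cnt.modify arr[i] 0 (· - 1)).erase arr[i]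
              else cnt.modify arr[i] 0 (· - 1)).size : Int) = k ∧
              b.length < (win arr (i+1) (j+1)).length
           then win arr (i+1) (j+1) else b)
          he him' hd1' hd2' rfl hok' (by omega)
        change loopA arr k fuel (i+1) j (win arr (i+1) (j+1)) _ _ = _
        rw [hrec]
        have htb : targetA arr k i (j+1) b = Aabs arr k (j+1) (upd arr k (j+1) b) := by
          rw [targetA, if_neg (by omega), if_neg (by omega)]
        rw [htb]
        by_cases hu' : (dcnt arr (i+1) (j+1) : Int) ≤ k
        · have hueq : (dcnt arr (i+1) (j+1) : Int) = k := by push_cast at hddge ⊢; omega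
          have hms : i + 1 = mstart arr k (j+1) := hd2' hu'
          have hb' : (if ((if (cnt.modify arr[i] 0 (· - 1)).getD arr[i] 0 = 0
              then (cnt.modify arr[i] 0 (· - 1)).erase arr[i]
              else cnt.modify arr[i] 0 (· - 1)).size : Int) = k ∧
              b.length < (win arr (i+1) (j+1)).length
           then win arr (i+1) (j+1) else b) = upd arr k (j+1) b := by
            rw [upd, ← hms, husize', hrestlen]
          rw [hb']
          rw [targetA, if_neg (by omega), if_pos (by rw [← hueq])]
        · have hb' : (if ((if (cnt.modify arr[i] 0 (· - 1)).getD arr[i] 0 = 0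
              then (cnt.modify arr[i] 0 (· - 1)).erase arr[i]
              else cnt.modify arr[i] 0 (· - 1)).size : Int) = k ∧
              b.length < (win arr (i+1) (j+1)).length
           then win arr (i+1) (j+1) else b) = b := by
            rw [if_neg]
            intro hcontra
            rw [husize'] at hcontra
            exact hu' (le_of_eq hcontra.1)
          rw [hb']
          rw [targetA, if_neg (by omega), if_neg hu']
    · -- loop guard false: j+1 = arr.length
      have hje : j + 1 = arr.length := by omega
      simp only [loopA]
      rw [if_neg hg, targetA, if_pos hje]
lemma cntOk_empty : CntOk [] (PySem.Dict.empty : PySem.Dict Int Int) := by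
  refine ⟨by simp [PySem.Dict.empty, PySem.Dict.keys], ?_, ?_⟩
  · intro x
    simp [PySem.Dict.empty, PySem.Dict.getD, PySem.Dict.get?]
  · intro x
    simp [PySem.Dict.empty, PySem.Dict.keys]

lemma win_zero_one (arr : List Int) (h : 1 ≤ arr.length) : win arr 0 1 = [arr[0]] := by
  unfold win
  cases arr with
  | nil => simp at h
  | cons x t => simp

lemma portA_eq (arr : List Int) (k : Int) (hk : 0 ≤ k) (hn : 2 ≤ arr.length) :
    find_longest_k_unique arr k = Aabs arr k 1 [] := by
  have hlen : ¬ (PySem.List.len arr = 1) := by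
    rw [PySem.List.len_eq]
    intro h
    rw [show arr.length = 1 by exact_mod_cast h] at hn
    omega
  cases arr with
  | nil => simp at hn
  | cons x t =>
    rw [find_longest_k_unique, if_neg hlen]
    have hcur : [x] = win (x :: t) 0 1 := by
      rw [win_zero_one (x :: t) (by simp)]
      simp
    have hok : CntOk [x] ((PySem.Dict.empty).modify x 0 (· + 1)) := by
      have := cntOk_extend [] PySem.Dict.empty cntOk_empty x
      simpa using this
    have hd01 : dcnt (x :: t) 0 1 = 1 := by
      unfold dcnt
      rw [← hcur]
      rfl
    have h1 := loopA_eq (x :: t) k hk (2*(x :: t).length + 2) 0 0 [x]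
      ((PySem.Dict.empty).modify x 0 (· + 1)) []
      (by simp only [Nat.zero_add, List.length_cons] at hn ⊢; omega) (by omega)
      (by simp only [Nat.zero_add]; rw [hd01]; omega)
      (by simp only [Nat.zero_add]; intro h; have := mstart_min (x :: t) k 1 0 h; omega)
      (by simp only [Nat.zero_add]; exact hcur) hok
      (by simp only [List.length_cons] at hn ⊢; omega)
    simp only [Nat.zero_add] at h1
    rw [h1, targetA]
    have hne : ¬ (1 = (x :: t).length) := by simp only [List.length_cons] at hn ⊢; omega
    rw [if_neg hne]
    by_cases hc : (dcnt (x :: t) 0 1 : Int) ≤ k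
    · rw [if_pos hc]
    · rw [if_neg hc]
      have hupd : upd (x :: t) k 1 [] = [] := by
        rw [upd, if_neg]
        intro hcontra
        have h2 := hcontra.2
        have h3 : mstart (x :: t) k 1 = 0 := by omega
        rw [h3] at hcontra
        rw [hd01] at hc
        exact hc (le_of_eq hcontra.1)
      rw [hupd]

-- Aabs as a fold over the remaining window ends
lemma Aabs_eq_foldUpd (arr : List Int) (k : Int) :
    ∀ (e : Nat) (b : List Int), 1 ≤ e → e + 1 ≤ arr.length →
    Aabs arr k e b = endn arr k (foldUpd arr k (List.range' (e+1) (arr.length - 1 - e)) b) := by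
  intro e
  induction hd : arr.length - e using Nat.strong_induction_on generalizing e with
  | _ d ih => ?_
  intro b he1 he2
  by_cases hlast : e + 1 = arr.length
  · rw [show arr.length - 1 - e = 0 by omega]
    rw [Aabs, dif_neg (by omega), if_pos hlast]
    show _ = endn arr k b
    rw [endn, show arr.length - 1 = e by omega, ← hlast]
  · have hen : e + 1 < arr.length := by omega
    rw [Aabs, dif_neg (by omega), if_neg hlast]
    rw [ih (arr.length - (e+1)) (by omega) (e+1) rfl (upd arr k (e+1) b) (by omega) (by omega)]
    congr 1
    rw [show arr.length - 1 - e = (arr.length - 1 - (e+1)) + 1 by omega, List.range'_succ]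
    rfl

-- ===== the B side: the nested loops compute foldUpd over all ends =====

lemma pv_nodup_card (s l : List Int) (h1 : s.Nodup) (h2 : ∀ x, x ∈ s ↔ x ∈ l) :
    s.length = l.toFinset.card := by
  rw [← List.toFinset_card_of_nodup h1]
  congr 1
  ext x
  simp only [List.mem_toFinset]
  exact h2 x

lemma innerB_eq_Bco (arr : List Int) (k : Int) (j : Nat) (hj : j < arr.length) :
    ∀ (i : Nat) (seen : PySem.Set Int) (b : List Int), i ≤ j →
    seen.Nodup → (∀ x, x ∈ seen ↔ x ∈ win arr (i+1) (j+1)) →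
    innerB arr k j i seen b = Bco arr k j i b := by
  have hstep : ∀ (i : Nat) (seen : PySem.Set Int) (b : List Int), i ≤ j →
      seen.Nodup → (∀ x, x ∈ seen ↔ x ∈ win arr (i+1) (j+1)) →
      ((bstep arr k j i seen b).2 = bupd arr k j i b ∧
       (bstep arr k j i seen b).1.Nodup ∧
       (∀ x, x ∈ (bstep arr k j i seen b).1 ↔ x ∈ win arr i (j+1))) := by
    intro i seen b hij hnd hmem
    have hin : i < arr.length := by omega
    have harr : PySem.List.pyGetD arr (i : Int) 0 = arr[i] := by
      rw [PySem.List.pyGetD_natCast]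
      exact List.getD_eq_getElem arr 0 hin
    have hwc : win arr i (j+1) = arr[i] :: win arr (i+1) (j+1) :=
      win_cons arr i (j+1) (by omega) hin
    have hmem' : ∀ x, x ∈ PySem.Set.add seen (PySem.List.pyGetD arr (i : Int) 0) ↔
        x ∈ win arr i (j+1) := by
      intro x
      rw [harr, PySem.Set.mem_add, hwc]
      simp only [List.mem_cons]
      rw [hmem x]
      tauto
    have hnd' : (PySem.Set.add seen (PySem.List.pyGetD arr (i : Int) 0)).Nodup :=
      PySem.Set.nodup_add _ _ hnd
    have hlen : ((PySem.Set.add seen (PySem.List.pyGetD arr (i : Int) 0)).length : Int)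
        = (dcnt arr i (j+1) : Int) := by
      have := pv_nodup_card _ (win arr i (j+1)) hnd' hmem'
      unfold dcnt
      exact_mod_cast congrArg (Nat.cast (R := Int)) this
    refine ⟨?_, hnd', hmem'⟩
    show (let seen' := PySem.Set.add seen (PySem.List.pyGetD arr (i : Int) 0);
          if (seen'.length : Int) = k ∧ (b.length : Int) < (j : Int) - (i : Int) + 1
          then PySem.List.slice arr (some (i : Int)) (some ((j : Int) + 1)) else b) = _
    simp only []
    rw [hlen]
    have hslice : PySem.List.slice arr (some (i : Int)) (some ((j : Int) + 1)) = win arr i (j+1) := by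
      rw [show ((j : Int) + 1) = ((j+1 : Nat) : Int) by push_cast; ring]
      rw [PySem.List.slice_natCast]
      rfl
    have hc2 : ((b.length : Int) < (j : Int) - (i : Int) + 1) ↔ (b.length < j + 1 - i) := by
      omega
    rw [bupd]
    by_cases h1 : (dcnt arr i (j+1) : Int) = k ∧ b.length < j + 1 - i
    · rw [if_pos h1, if_pos ⟨h1.1, hc2.2 h1.2⟩, hslice]
    · rw [if_neg h1, if_neg]
      intro hcontra
      exact h1 ⟨hcontra.1, hc2.1 hcontra.2⟩
  intro i
  induction i with
  | zero =>
    intro seen b hij hnd hmem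
    show (bstep arr k j 0 seen b).2 = Bco arr k j 0 b
    rw [(hstep 0 seen b hij hnd hmem).1]
    rfl
  | succ i ih =>
    intro seen b hij hnd hmem
    have h := hstep (i+1) seen b hij hnd hmem
    show innerB arr k j i (bstep arr k j (i+1) seen b).1 (bstep arr k j (i+1) seen b).2
        = Bco arr k j (i+1) b
    rw [ih _ _ (by omega) h.2.1 h.2.2, h.1]
    rfl

lemma Bco_none (arr : List Int) (k : Int) (j : Nat) :
    ∀ (i : Nat) (b : List Int),
    (∀ i', i' ≤ i → ¬((dcnt arr i' (j+1) : Int) = k ∧ b.length < j + 1 - i')) →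
    Bco arr k j i b = b := by
  intro i
  induction i with
  | zero =>
    intro b h
    show bupd arr k j 0 b = b
    rw [bupd, if_neg (h 0 (le_refl _))]
  | succ i ih =>
    intro b h
    show Bco arr k j i (bupd arr k j (i+1) b) = b
    rw [bupd, if_neg (h (i+1) (le_refl _))]
    exact ih b (fun i' hi' => h i' (by omega))

lemma Bco_hit (arr : List Int) (k : Int) (j : Nat) (hj : j < arr.length) :
    ∀ (i : Nat) (b : List Int), mstart arr k (j+1) ≤ i → i ≤ j →
    (dcnt arr (mstart arr k (j+1)) (j+1) : Int) = k →
    b.length < j + 1 - mstart arr k (j+1) →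
    Bco arr k j i b = win arr (mstart arr k (j+1)) (j+1) := by
  intro i
  induction i with
  | zero =>
    intro b hms hij hdk hbl
    have h0 : mstart arr k (j+1) = 0 := by omega
    rw [h0] at hdk hbl ⊢
    show bupd arr k j 0 b = _
    rw [bupd, if_pos ⟨hdk, by omega⟩]
  | succ i ih =>
    intro b hms hij hdk hbl
    show Bco arr k j i (bupd arr k j (i+1) b) = _
    by_cases hmi : mstart arr k (j+1) = i + 1
    · have hfire : bupd arr k j (i+1) b = win arr (mstart arr k (j+1)) (j+1) := by
        rw [bupd, ← hmi, if_pos ⟨hdk, hbl⟩]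
      rw [hfire]
      apply Bco_none
      intro i' hi' hcontra
      have : k < (dcnt arr i' (j+1) : Int) := lt_mstart arr k (j+1) i' (by omega)
      omega
    · have hms' : mstart arr k (j+1) ≤ i := by omega
      apply ih _ hms' (by omega) hdk
      rw [bupd]
      by_cases hfi : (dcnt arr (i+1) (j+1) : Int) = k ∧ b.length < j + 1 - (i+1)
      · rw [if_pos hfi, win_len arr (i+1) (j+1) (by omega)]
        omega
      · rw [if_neg hfi]
        exact hbl

lemma Bco_eq_upd (arr : List Int) (k : Int) (j : Nat) (hj : j < arr.length) (_hk : 0 ≤ k)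
    (b : List Int) : Bco arr k j j b = upd arr k (j+1) b := by
  by_cases hq : (dcnt arr (mstart arr k (j+1)) (j+1) : Int) = k ∧
      b.length < j + 1 - mstart arr k (j+1)
  · have hmsj : mstart arr k (j+1) ≤ j := by
      have h1 := mstart_le arr k (j+1)
      rcases Nat.lt_or_ge (mstart arr k (j+1)) (j+1) with h | h
      · omega
      · exfalso
        have : j + 1 - mstart arr k (j+1) = 0 := by omega
        rw [this] at hq
        omega
    rw [Bco_hit arr k j hj j b hmsj (le_refl _) hq.1 hq.2, upd, if_pos hq]
  · rw [upd, if_neg hq]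
    apply Bco_none
    intro i' hi' hcontra
    have h1 : mstart arr k (j+1) ≤ i' := mstart_min arr k (j+1) i' (le_of_eq hcontra.1)
    have h2 : (dcnt arr (mstart arr k (j+1)) (j+1) : Int) = k :=
      dcnt_mstart_eq_of_exists arr k (j+1) i' hcontra.1
    exact hq ⟨h2, by omega⟩

lemma portB_eq (arr : List Int) (k : Int) (hk : 0 ≤ k) (hn : 2 ≤ arr.length) :
    find_longest_k_unique_alt arr k = foldUpd arr k (List.range' 1 arr.length) [] := by
  have hlen : ¬ (PySem.List.len arr = 1) := by
    rw [PySem.List.len_eq]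
    intro h
    rw [show arr.length = 1 by exact_mod_cast h] at hn
    omega
  rw [find_longest_k_unique_alt, if_neg hlen]
  have hcong : ∀ (b : List Int) (j : Nat), j ∈ List.range arr.length →
      innerB arr k j j PySem.Set.empty b = upd arr k (j+1) b := by
    intro b j hjmem
    have hj : j < arr.length := List.mem_range.1 hjmem
    rw [innerB_eq_Bco arr k j hj j PySem.Set.empty b (le_refl _) List.nodup_nil
        (by intro x; rw [win_empty arr (j+1) (j+1) (le_refl _)]; simp [PySem.Set.empty])]
    exact Bco_eq_upd arr k j hj hk b
  have h2 : List.foldl (fun best j => innerB arr k j j PySem.Set.empty best) [] (List.range arr.length)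
      = List.foldl (fun b j => upd arr k (j+1) b) [] (List.range arr.length) :=
    PySem.List.foldl_congr_mem _ _ _ _ hcong
  rw [h2, foldUpd, List.range'_eq_map_range, List.foldl_map]
  apply PySem.List.foldl_congr_mem
  intro b j hjmem
  rw [Nat.add_comm 1 j]
-- ===== comparing the two folds =====

lemma upd_len_ge (arr : List Int) (k : Int) (e : Nat) (b : List Int) (he : e ≤ arr.length) :
    b.length ≤ (upd arr k e b).length := by
  rw [upd]
  split_ifs with h
  · rw [win_len arr _ e he]
    omega
  · exact le_refl _

lemma foldUpd_len_mono (arr : List Int) (k : Int) :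
    ∀ (es : List Nat) (b : List Int), (∀ e ∈ es, e ≤ arr.length) →
    b.length ≤ (foldUpd arr k es b).length := by
  intro es
  induction es with
  | nil => intro b _; exact le_refl _
  | cons a rest ih =>
    intro b hes
    calc b.length ≤ (upd arr k a b).length := upd_len_ge arr k a b (hes a List.mem_cons_self)
      _ ≤ (foldUpd arr k rest (upd arr k a b)).length :=
          ih _ (fun e he => hes e (List.mem_cons_of_mem _ he))
      _ = (foldUpd arr k (a :: rest) b).length := rfl

lemma foldUpd_len_ge (arr : List Int) (k : Int) :
    ∀ (es : List Nat) (b : List Int) (e : Nat), (∀ e' ∈ es, e' ≤ arr.length) → e ∈ es →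
    (dcnt arr (mstart arr k e) e : Int) = k →
    e - mstart arr k e ≤ (foldUpd arr k es b).length := by
  intro es
  induction es with
  | nil => intro b e _ he _; simp at he
  | cons a rest ih =>
    intro b e hes he hv
    rcases List.mem_cons.1 he with he | he
    · subst he
      have h1 : e - mstart arr k e ≤ (upd arr k e b).length := by
        rw [upd]
        split_ifs with h
        · rw [win_len arr _ e (hes e List.mem_cons_self)]
        · rw [not_and_or] at h
          rcases h with h | h
          · exact absurd hv h
          · omega
      calc e - mstart arr k e ≤ (upd arr k e b).length := h1
        _ ≤ (foldUpd arr k rest (upd arr k e b)).length :=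
            foldUpd_len_mono arr k rest _ (fun e' he' => hes e' (List.mem_cons_of_mem _ he'))
        _ = (foldUpd arr k (e :: rest) b).length := rfl
    · exact ih _ e (fun e' he' => hes e' (List.mem_cons_of_mem _ he')) he hv

-- two seeds of length ≤ 1 give the same fold as soon as some end carries a valid window
-- of length ≥ 2
lemma foldUpd_seed (arr : List Int) (k : Int) :
    ∀ (es : List Nat) (b1 b2 : List Int), (∀ e ∈ es, e ≤ arr.length) →
    b1.length ≤ 1 → b2.length ≤ 1 →
    (∃ e ∈ es, (dcnt arr (mstart arr k e) e : Int) = k ∧ 2 ≤ e - mstart arr k e) →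
    foldUpd arr k es b1 = foldUpd arr k es b2 := by
  intro es
  induction es with
  | nil =>
    intro b1 b2 _ _ _ hex
    rcases hex with ⟨e, he, _⟩
    simp at he
  | cons a rest ih =>
    intro b1 b2 hes hb1 hb2 hex
    by_cases hbig : (dcnt arr (mstart arr k a) a : Int) = k ∧ 2 ≤ a - mstart arr k a
    · show foldUpd arr k rest (upd arr k a b1) = foldUpd arr k rest (upd arr k a b2)
      have h1 : upd arr k a b1 = win arr (mstart arr k a) a := by
        rw [upd, if_pos ⟨hbig.1, by omega⟩]
      have h2 : upd arr k a b2 = win arr (mstart arr k a) a := by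
        rw [upd, if_pos ⟨hbig.1, by omega⟩]
      rw [h1, h2]
    · have hsmall : ∀ b : List Int, b.length ≤ 1 → (upd arr k a b).length ≤ 1 := by
        intro b hb
        rw [upd]
        split_ifs with h
        · rw [win_len arr _ a (hes a List.mem_cons_self)]
          rw [not_and_or] at hbig
          rcases hbig with hbig | hbig
          · exact absurd h.1 hbig
          · omega
        · exact hb
      have hex' : ∃ e ∈ rest, (dcnt arr (mstart arr k e) e : Int) = k ∧ 2 ≤ e - mstart arr k e := by
        rcases hex with ⟨e, he, hprop⟩
        rcases List.mem_cons.1 he with he | he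
        · subst he; exact absurd hprop hbig
        · exact ⟨e, he, hprop⟩
      exact ih _ _ (fun e' he' => hes e' (List.mem_cons_of_mem _ he'))
        (hsmall b1 hb1) (hsmall b2 hb2) hex'

lemma foldUpd_stall (arr : List Int) (k : Int) :
    ∀ (es : List Nat) (b : List Int), (∀ e ∈ es, e - mstart arr k e ≤ b.length) →
    foldUpd arr k es b = b := by
  intro es
  induction es with
  | nil => intro b _; rfl
  | cons a rest ih =>
    intro b h
    show foldUpd arr k rest (upd arr k a b) = b
    have h1 : upd arr k a b = b := by
      rw [upd, if_neg]
      intro hcontra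
      have := h a List.mem_cons_self
      omega
    rw [h1]
    exact ih b (fun e he => h e (List.mem_cons_of_mem _ he))

-- ===== assembling the equivalence =====

lemma win_single (arr : List Int) (e : Nat) (h1 : 1 ≤ e) (h2 : e ≤ arr.length) :
    win arr (e-1) e = [arr[e-1]'(by omega)] := by
  rw [win_cons arr (e-1) e (by omega) (by omega), show e-1+1 = e by omega,
      win_empty arr e e (le_refl _)]

lemma dcnt_single (arr : List Int) (e : Nat) (h1 : 1 ≤ e) (h2 : e ≤ arr.length) :
    dcnt arr (e-1) e = 1 := by
  unfold dcnt
  rw [win_single arr e h1 h2]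
  simp

lemma win_pair (arr : List Int) (p : Nat) (hp : p + 2 ≤ arr.length) :
    win arr p (p+2) = [arr[p]'(by omega), arr[p+1]'(by omega)] := by
  rw [win_cons arr p (p+2) (by omega) (by omega),
      win_cons arr (p+1) (p+2) (by omega) (by omega),
      win_empty arr (p+2) (p+2) (le_refl _)]

lemma dcnt_pair_one (arr : List Int) (p : Nat) (hp : p + 2 ≤ arr.length)
    (heq : arr[p]'(by omega) = arr[p+1]'(by omega)) : dcnt arr p (p+2) = 1 := by
  unfold dcnt
  rw [win_pair arr p hp, heq]
  simp

lemma dcnt_pair_two (arr : List Int) (p : Nat) (hp : p + 2 ≤ arr.length)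
    (hne : arr[p]'(by omega) ≠ arr[p+1]'(by omega)) : dcnt arr p (p+2) = 2 := by
  unfold dcnt
  rw [win_pair arr p hp]
  simp [hne]

lemma pv_pair_of_not_chain (arr : List Int) (h : ¬ List.IsChain (· ≠ ·) arr) :
    ∃ p, ∃ (hp : p + 1 < arr.length), arr[p] = arr[p+1] := by
  rw [List.isChain_iff_getElem] at h
  push Not at h
  obtain ⟨i, hi, hii⟩ := h
  exact ⟨i, hi, hii⟩

lemma upd_one_len (arr : List Int) (k : Int) (hn : 1 ≤ arr.length) :
    (upd arr k 1 []).length ≤ 1 := by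
  rw [upd]
  split_ifs with h
  · rw [win_len arr _ 1 hn]
    omega
  · simp

-- the canonical window ending at the final index never improves A's fold when it would
-- have needed a shrink A's loop no longer performs (outside D_)
lemma endn_eq (arr : List Int) (k : Int) (hk : 0 ≤ k) (hn : 2 ≤ arr.length)
    (hd : ¬ D_find_longest_k_unique arr k) :
    endn arr k (foldUpd arr k (List.range' 2 (arr.length - 2)) []) =
    upd arr k arr.length (foldUpd arr k (List.range' 2 (arr.length - 2)) []) := by
  set F := foldUpd arr k (List.range' 2 (arr.length - 2)) [] with hF
  by_cases hmm : mstart arr k arr.length = mstart arr k (arr.length - 1)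
  · rw [endn, if_pos hmm]
  · rw [endn, if_neg hmm]
    have hmono : mstart arr k (arr.length - 1) ≤ mstart arr k arr.length := by
      have := mstart_mono arr k (arr.length - 1) hk (by omega)
      rw [show arr.length - 1 + 1 = arr.length by omega] at this
      exact this
    have hlt : mstart arr k (arr.length - 1) < mstart arr k arr.length := by
      rcases Nat.lt_or_ge (mstart arr k (arr.length - 1)) (mstart arr k arr.length) with h | h
      · exact h
      · exact absurd (by omega) hmm
    symm
    rw [upd, if_neg]
    intro hcontra
    obtain ⟨hdk, hflen⟩ := hcontra
    by_cases hn2 : arr.length = 2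
    · -- F = [], and the only way the final window fires forces k = 1 with arr[0] ≠ arr[1],
      -- which ¬D_ rules out
      have hFnil : F = [] := by
        rw [hF, show arr.length - 2 = 0 from by omega]
        rfl
      rw [hFnil] at hflen
      simp only [List.length_nil] at hflen
      have hm2 : mstart arr k arr.length ≤ 1 := by omega
      have hm2' : 1 ≤ mstart arr k arr.length := by omega
      have hm2eq : mstart arr k arr.length = 1 := by omega
      rw [hm2eq, hn2] at hdk
      rw [show (1 : Nat) = 2 - 1 from rfl, dcnt_single arr 2 (by omega) (by omega)] at hdk
      have hk1 : k = 1 := by omega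
      -- from ¬D_ : some adjacent pair is equal
      have hchain : ¬ List.IsChain (· ≠ ·) arr := by
        intro hc
        exact hd ⟨hk1, hn, hc⟩
      obtain ⟨p, hp, hpeq⟩ := pv_pair_of_not_chain arr hchain
      have hp0 : p = 0 := by omega
      subst hp0
      have hd02 : dcnt arr 0 2 = 1 := by
        have := dcnt_pair_one arr 0 (by omega) hpeq
        simpa using this
      have : mstart arr k arr.length ≤ 0 := by
        apply mstart_min
        rw [hn2, hd02, hk1]
        simp
      omega
    · -- arr.length ≥ 3 : the window ending one earlier is valid and at least as long
      have hn3 : 3 ≤ arr.length := by omega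
      have hml : mstart arr k (arr.length - 1) ≤ arr.length - 1 := mstart_le arr k _
      have hstep := dcnt_le_succ_right arr (mstart arr k (arr.length - 1)) (arr.length - 1)
        hml (by omega)
      rw [show arr.length - 1 + 1 = arr.length by omega] at hstep
      have hgt : k < (dcnt arr (mstart arr k (arr.length - 1)) arr.length : Int) :=
        lt_mstart arr k arr.length _ hlt
      have hle2 : (dcnt arr (mstart arr k (arr.length - 1)) (arr.length - 1) : Int) ≤ k :=
        dcnt_mstart_le arr k _ hk
      have hprev : (dcnt arr (mstart arr k (arr.length - 1)) (arr.length - 1) : Int) = k := by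
        push_cast at hstep hgt hle2 ⊢
        omega
      have hFlen := foldUpd_len_ge arr k (List.range' 2 (arr.length - 2)) [] (arr.length - 1)
        (by intro e' he'; rw [List.mem_range'_1] at he'; omega)
        (by rw [List.mem_range'_1]; omega) hprev
      rw [← hF] at hFlen
      have := mstart_le arr k arr.length
      omega

lemma main_eq (arr : List Int) (k : Int) (hk : 0 ≤ k) (hn : 2 ≤ arr.length)
    (hd : ¬ D_find_longest_k_unique arr k) :
    find_longest_k_unique arr k = find_longest_k_unique_alt arr k := by
  have hA : find_longest_k_unique arr k
      = endn arr k (foldUpd arr k (List.range' 2 (arr.length - 2)) []) := by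
    rw [portA_eq arr k hk hn, Aabs_eq_foldUpd arr k 1 [] (le_refl _) (by omega),
        show arr.length - 1 - 1 = arr.length - 2 by omega]
  have hB1 : find_longest_k_unique_alt arr k
      = foldUpd arr k (List.range' 2 (arr.length - 1)) (upd arr k 1 []) := by
    have hr : List.range' 1 arr.length = 1 :: List.range' 2 (arr.length - 1) := by
      have h := List.range'_succ (s := 1) (n := arr.length - 1) (step := 1)
      rw [show arr.length - 1 + 1 = arr.length by omega] at h
      simpa using h
    rw [portB_eq arr k hk hn, hr]
    rfl
  have hseed : foldUpd arr k (List.range' 2 (arr.length - 1)) (upd arr k 1 [])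
      = foldUpd arr k (List.range' 2 (arr.length - 1)) [] := by
    by_cases hk1 : k = 1
    · -- ¬ D_ gives an equal adjacent pair, hence a valid window of length ≥ 2
      subst hk1
      have hchain : ¬ List.IsChain (· ≠ ·) arr := fun hc => hd ⟨rfl, hn, hc⟩
      obtain ⟨p, hp, hpeq⟩ := pv_pair_of_not_chain arr hchain
      apply foldUpd_seed arr 1 _ _ _
        (by intro e' he'; rw [List.mem_range'_1] at he'; omega)
        (upd_one_len arr 1 (by omega)) (by simp)
      refine ⟨p + 2, by rw [List.mem_range'_1]; omega, ?_, ?_⟩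
      · have hdp : dcnt arr p (p+2) = 1 := dcnt_pair_one arr p (by omega) hpeq
        have hm : mstart arr 1 (p+2) ≤ p := mstart_min arr 1 (p+2) p (by rw [hdp]; simp)
        have h1 : 1 ≤ dcnt arr (mstart arr 1 (p+2)) (p+2) :=
          dcnt_pos arr _ (p+2) (by omega) (by omega)
        have h2 := dcnt_mstart_le arr 1 (p+2) (by omega)
        push_cast at h2 ⊢
        omega
      · have hdp : dcnt arr p (p+2) = 1 := dcnt_pair_one arr p (by omega) hpeq
        have hm : mstart arr 1 (p+2) ≤ p := mstart_min arr 1 (p+2) p (by rw [hdp]; simp)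
        omega
    · -- k ≠ 1 : the seed window [arr[0]] cannot fire
      have h1 : upd arr k 1 [] = [] := by
        rw [upd, if_neg]
        intro hcontra
        obtain ⟨hdk, hlen⟩ := hcontra
        have hm0 : mstart arr k 1 = 0 := by omega
        rw [hm0, show (0 : Nat) = 1 - 1 from rfl, dcnt_single arr 1 (by omega) (by omega)] at hdk
        exact hk1 (by omega)
      rw [h1]
  have hsplit : List.range' 2 (arr.length - 1)
      = List.range' 2 (arr.length - 2) ++ [arr.length] := by
    rw [show arr.length - 1 = (arr.length - 2) + 1 by omega, List.range'_concat,
        show 2 + 1 * (arr.length - 2) = arr.length by omega]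
  have happ : foldUpd arr k (List.range' 2 (arr.length - 1)) []
      = upd arr k arr.length (foldUpd arr k (List.range' 2 (arr.length - 2)) []) := by
    rw [hsplit, foldUpd, List.foldl_append]
    rfl
  rw [hA, hB1, hseed, happ, endn_eq arr k hk hn hd]

-- ===== the intended difference, exactly =====

lemma tight_main (arr : List Int) (hn : 2 ≤ arr.length) (hc : List.IsChain (· ≠ ·) arr) :
    find_longest_k_unique arr 1 ≠ find_longest_k_unique_alt arr 1 := by
  have hms : ∀ e, 2 ≤ e → e ≤ arr.length → mstart arr 1 e = e - 1 := by
    intro e h2 hle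
    have hsingle : dcnt arr (e-1) e = 1 := dcnt_single arr e (by omega) hle
    have hub : mstart arr 1 e ≤ e - 1 := mstart_min arr 1 e (e-1) (by rw [hsingle]; simp)
    have hne : arr[e-2]'(by omega) ≠ arr[e-2+1]'(by omega) :=
      List.isChain_iff_getElem.1 hc (e-2) (by omega)
    have hpair2 : dcnt arr (e-2) e = 2 := by
      have := dcnt_pair_two arr (e-2) (by omega) hne
      rw [show e-2+2 = e by omega] at this
      exact this
    have hlb : ¬ (mstart arr 1 e ≤ e - 2) := by
      intro hcon
      have h1 := dcnt_anti arr e (mstart arr 1 e) (e-2) hcon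
      have h2 := dcnt_mstart_le arr 1 e (by omega)
      rw [hpair2] at h1
      omega
    omega
  have hm1 : mstart arr 1 1 = 0 := by
    have hd01 : dcnt arr 0 1 = 1 := by simpa using dcnt_single arr 1 (le_refl _) (by omega)
    have := mstart_min arr 1 1 0 (by rw [hd01]; simp)
    omega
  have hd01 : dcnt arr 0 1 = 1 := by simpa using dcnt_single arr 1 (le_refl _) (by omega)
  have hupd1 : upd arr 1 1 [] = [arr[0]'(by omega)] := by
    rw [upd, hm1, if_pos ⟨by rw [hd01]; simp, by simp⟩]
    exact win_zero_one arr (by omega)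
  have hA : find_longest_k_unique arr 1
      = endn arr 1 (foldUpd arr 1 (List.range' 2 (arr.length - 2)) []) := by
    rw [portA_eq arr 1 (by omega) hn, Aabs_eq_foldUpd arr 1 1 [] (le_refl _) (by omega),
        show arr.length - 1 - 1 = arr.length - 2 by omega]
  have hB1 : find_longest_k_unique_alt arr 1
      = foldUpd arr 1 (List.range' 2 (arr.length - 1)) [arr[0]'(by omega)] := by
    have hr : List.range' 1 arr.length = 1 :: List.range' 2 (arr.length - 1) := by
      have h := List.range'_succ (s := 1) (n := arr.length - 1) (step := 1)
      rw [show arr.length - 1 + 1 = arr.length by omega] at h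
      simpa using h
    rw [portB_eq arr 1 (by omega) hn, hr]
    show foldUpd arr 1 (List.range' 2 (arr.length - 1)) (upd arr 1 1 []) = _
    rw [hupd1]
  have hstall : ∀ (m : Nat) (b : List Int), 1 ≤ b.length →
      (∀ e ∈ List.range' 2 m, e ≤ arr.length) →
      foldUpd arr 1 (List.range' 2 m) b = b := by
    intro m b hb hbound
    apply foldUpd_stall
    intro e he
    have h1 := hbound e he
    rw [List.mem_range'_1] at he
    rw [hms e (by omega) h1]
    omega
  have hB : find_longest_k_unique_alt arr 1 = [arr[0]'(by omega)] := by
    rw [hB1]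
    apply hstall
    · simp
    · intro e he
      rw [List.mem_range'_1] at he
      omega
  by_cases hn2 : arr.length = 2
  · -- A = []
    have hA2 : find_longest_k_unique arr 1 = [] := by
      rw [hA, show arr.length - 2 = 0 by omega]
      show endn arr 1 [] = []
      have hneq : ¬ (mstart arr 1 arr.length = mstart arr 1 (arr.length - 1)) := by
        rw [hms arr.length hn (le_refl _), show arr.length - 1 = 1 by omega, hm1]
        omega
      rw [endn, if_neg hneq]
    rw [hA2, hB]
    simp
  · -- A = [arr[1]]
    have hsplit : List.range' 2 (arr.length - 2) = 2 :: List.range' 3 (arr.length - 3) := by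
      have h := List.range'_succ (s := 2) (n := arr.length - 3) (step := 1)
      rw [show arr.length - 3 + 1 = arr.length - 2 by omega] at h
      simpa using h
    have hupd2 : upd arr 1 2 [] = [arr[1]'(by omega)] := by
      have hm2 : mstart arr 1 2 = 1 := by simpa using hms 2 (le_refl _) (by omega)
      have hd12 : dcnt arr 1 2 = 1 := by simpa using dcnt_single arr 2 (by omega) (by omega)
      rw [upd, hm2, if_pos ⟨by rw [hd12]; simp, by simp⟩]
      have := win_single arr 2 (by omega) (by omega)
      simpa using this
    have hF : foldUpd arr 1 (List.range' 2 (arr.length - 2)) [] = [arr[1]'(by omega)] := by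
      rw [hsplit]
      show foldUpd arr 1 (List.range' 3 (arr.length - 3)) (upd arr 1 2 []) = _
      rw [hupd2]
      apply foldUpd_stall
      intro e he
      rw [List.mem_range'_1] at he
      rw [hms e (by omega) (by omega)]
      simp only [List.length_cons, List.length_nil]
      omega
    have hA3 : find_longest_k_unique arr 1 = [arr[1]'(by omega)] := by
      rw [hA, hF, endn, if_neg]
      rw [hms arr.length hn (le_refl _), hms (arr.length - 1) (by omega) (by omega)]
      omega
    rw [hA3, hB]
    intro hcontra
    have h01 : arr[0]'(by omega) ≠ arr[0+1]'(by omega) :=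
      List.isChain_iff_getElem.1 hc 0 (by omega)
    simp only [List.cons.injEq] at hcontra
    exact h01 hcontra.1.symm

-- ===== VERDICT (by name: the statement is the Claim_ definition above) =====
theorem find_longest_k_unique_spec : Claim_unchanged_find_longest_k_unique := by
  intro arr k _ hpre hd
  obtain ⟨hne, hk⟩ := hpre
  show find_longest_k_unique arr k = find_longest_k_unique_alt arr k
  by_cases h1 : arr.length = 1
  · simp [find_longest_k_unique, find_longest_k_unique_alt, PySem.List.len, h1]
  · have hn : 2 ≤ arr.length := by
      cases arr with
      | nil => exact absurd rfl hne
      | cons x t => simp only [List.length_cons] at h1 ⊢; omega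
    rcases hk with hk | hk
    · exact main_eq arr k hk hn (by exact hd)
    · exact absurd hk h1

theorem find_longest_k_unique_changed : Claim_changed_find_longest_k_unique := by
  unfold Claim_changed_find_longest_k_unique; decide

theorem find_longest_k_unique_tight : Claim_exact_find_longest_k_unique := by
  intro arr k _ _ hd
  obtain ⟨hk1, hn, hc⟩ := hd
  subst hk1
  exact tight_main arr hn hc
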